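-- pv_equiv track=rewrite | github.com/TEAMDESTINY/bakabot | baka/plugins/admin.py | parse_amount_and_target
-- ===== SOURCE A (Python) =====
-- def parse_amount_and_target(args):
--     amount = None
--     target_str = None
--
--     for arg in args:
--         if arg.isdigit() and amount is None:
--             amount = int(arg)
--         else:
--             target_str = arg
--
--     return amount, target_str
-- ===== SOURCE B (Python) =====
-- def parse_amount_and_target(args):
--     # Pass 1: short-circuit search for the first all-digit token.
--     amount = None
--     idx = None
--     for i, arg in enumerate(args):
--         if arg.isdigit():
--             idx = i
--             amount = int(arg)
--             break
--     # The target is the last token whose position is not the amount's position.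
--     n = len(args)
--     if idx != n - 1:
--         target_str = args[-1] if n else None
--     else:
--         target_str = args[-2] if n >= 2 else None
--     return amount, target_str
-- ===== Notes on version B (the rewrite author's own statement) =====
-- stated objective: alternative
-- what changed: Replaces the single fold that rewrites (amount, target) at every token with a short-circuit scan finding the first all-digit token and direct end-of-list indexing (args[-1]/args[-2]) for the target, using the fact that the target is the last token at a position other than the first-digit position.
import Mathlib
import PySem

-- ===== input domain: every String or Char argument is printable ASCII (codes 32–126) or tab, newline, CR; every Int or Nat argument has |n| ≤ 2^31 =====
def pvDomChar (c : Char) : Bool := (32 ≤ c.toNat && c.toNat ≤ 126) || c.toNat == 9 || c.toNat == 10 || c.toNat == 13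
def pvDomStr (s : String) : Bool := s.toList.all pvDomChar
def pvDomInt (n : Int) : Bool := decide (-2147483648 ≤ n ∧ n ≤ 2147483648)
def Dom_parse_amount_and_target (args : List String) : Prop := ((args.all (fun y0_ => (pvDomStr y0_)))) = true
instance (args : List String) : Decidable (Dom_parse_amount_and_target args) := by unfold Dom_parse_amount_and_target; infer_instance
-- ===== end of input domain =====

-- B replaces A's single fold that rewrites (amount, target) at every token with a
-- short-circuit search for the first all-digit token plus direct end-of-list
-- indexing for the target (objective: alternative decomposition, same O(n) cost).

-- ===== PORT A =====
-- int(arg) is guarded by arg.isdigit(), so it never raises; the .getD 0 default is unreachable.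
def parse_amount_and_target (args : List String) : Option Int × Option String :=
  args.foldl
    (fun (st : Option Int × Option String) arg =>
      if PySem.Str.strIsdigit arg && st.1.isNone then
        (some ((PySem.Int.ofStr? arg).getD 0), st.2)
      else
        (st.1, some arg))
    (none, none)

-- ===== PORT B =====
-- the 'for i, arg in enumerate(args): … break' loop of Source B: index and int value
-- of the first all-digit token (the same unreachable .getD 0 as in port A).
def pvFindDigit : List String → Nat → Option (Nat × Int)
  | [], _ => none
  | a :: rest, i =>
      if PySem.Str.strIsdigit a then some (i, (PySem.Int.ofStr? a).getD 0)
      else pvFindDigit rest (i + 1)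

def parse_amount_and_target_alt (args : List String) : Option Int × Option String :=
  let fd := pvFindDigit args 0
  let amount : Option Int := fd.map (·.2)
  let n := args.length
  let target_str : Option String :=
    if fd.map (·.1) ≠ some (n - 1) then
      (if n ≠ 0 then PySem.List.pyGet? args (-1) else none)   -- args[-1] if n else None
    else
      (if 2 ≤ n then PySem.List.pyGet? args (-2) else none)   -- args[-2] if n >= 2 else None
  (amount, target_str)

-- ===== PRECONDITION & SPEC =====
def Spec_parse_amount_and_target (args : List String) (out : Option Int × Option String) : Prop := out = parse_amount_and_target_alt args
instance (args : List String) (out : Option Int × Option String) : Decidable (Spec_parse_amount_and_target args out) := by unfold Spec_parse_amount_and_target; infer_instance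

-- ===== CLAIM (what is proved, stated in full; the proofs are below) =====
def Claim_equal_parse_amount_and_target : Prop := ∀ (args : List String), Dom_parse_amount_and_target args → Spec_parse_amount_and_target args (parse_amount_and_target args)

-- ===== LEMMAS AND PROOFS =====

-- Once amount is set, the fold only updates the target: it ends as the last element (or t0).
theorem pv_foldl_some (args : List String) (v : Int) (t0 : Option String) :
    args.foldl
      (fun (st : Option Int × Option String) arg =>
        if PySem.Str.strIsdigit arg && st.1.isNone then
          (some ((PySem.Int.ofStr? arg).getD 0), st.2)
        else
          (st.1, some arg))
      (some v, t0) = (some v, args.getLast?.or t0) := by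
  induction args generalizing t0 with
  | nil => simp
  | cons a rest ih =>
      simp only [List.foldl_cons, Option.isNone_some, Bool.and_false, Bool.false_eq_true,
        ite_false]
      rw [ih]
      cases rest with
      | nil => simp
      | cons b bs =>
          rw [List.getLast?_cons_cons,
            Option.or_of_isSome (List.getLast?_isSome.mpr (by simp)),
            Option.or_of_isSome (List.getLast?_isSome.mpr (by simp))]

-- On a digit-free list the fold leaves amount none and the target is the last element (or t0).
theorem pv_foldl_nodigit (args : List String) (t0 : Option String)
    (h : ∀ x ∈ args, PySem.Str.strIsdigit x = false) :
    args.foldl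
      (fun (st : Option Int × Option String) arg =>
        if PySem.Str.strIsdigit arg && st.1.isNone then
          (some ((PySem.Int.ofStr? arg).getD 0), st.2)
        else
          (st.1, some arg))
      (none, t0) = (none, args.getLast?.or t0) := by
  induction args generalizing t0 with
  | nil => simp
  | cons a rest ih =>
      have ha : PySem.Str.strIsdigit a = false := h a (by simp)
      simp only [List.foldl_cons, ha, Bool.false_and, Bool.false_eq_true, ite_false]
      rw [ih _ (fun x hx => h x (by simp [hx]))]
      cases rest with
      | nil => simp
      | cons b bs =>
          rw [List.getLast?_cons_cons,
            Option.or_of_isSome (List.getLast?_isSome.mpr (by simp)),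
            Option.or_of_isSome (List.getLast?_isSome.mpr (by simp))]

-- pvFindDigit finds nothing on a digit-free list.
theorem pvFindDigit_nodigit (args : List String) (i : Nat)
    (h : ∀ x ∈ args, PySem.Str.strIsdigit x = false) :
    pvFindDigit args i = none := by
  induction args generalizing i with
  | nil => rfl
  | cons a rest ih =>
      have ha : PySem.Str.strIsdigit a = false := h a (by simp)
      simp only [pvFindDigit, ha, Bool.false_eq_true, ite_false]
      exact ih (i + 1) (fun x hx => h x (by simp [hx]))

-- pvFindDigit on a digit-free prefix followed by a digit token.
theorem pvFindDigit_split (pre : List String) (d : String) (post : List String) (i : Nat)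
    (hpre : ∀ x ∈ pre, PySem.Str.strIsdigit x = false)
    (hd : PySem.Str.strIsdigit d = true) :
    pvFindDigit (pre ++ d :: post) i = some (i + pre.length, (PySem.Int.ofStr? d).getD 0) := by
  induction pre generalizing i with
  | nil => simp only [List.nil_append, pvFindDigit, hd, ite_true, Nat.add_zero,
      List.length_nil]
  | cons a rest ih =>
      have ha : PySem.Str.strIsdigit a = false := hpre a (by simp)
      simp only [List.cons_append, pvFindDigit, ha, Bool.false_eq_true, ite_false]
      rw [ih (i + 1) (fun x hx => hpre x (by simp [hx]))]
      simp [Nat.add_comm, Nat.add_left_comm]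

-- Every list is digit-free or splits at its first digit token.
theorem pv_split (args : List String) :
    (∀ x ∈ args, PySem.Str.strIsdigit x = false) ∨
    ∃ pre d post, args = pre ++ d :: post ∧
      (∀ x ∈ pre, PySem.Str.strIsdigit x = false) ∧ PySem.Str.strIsdigit d = true := by
  induction args with
  | nil => exact Or.inl (by simp)
  | cons a rest ih =>
      by_cases ha : PySem.Str.strIsdigit a = true
      · exact Or.inr ⟨[], a, rest, by simp, by simp, ha⟩
      · rcases ih with h | ⟨pre, d, post, heq, hpre, hd⟩
        · exact Or.inl (by
            intro x hx
            rcases List.mem_cons.mp hx with rfl | hx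
            · simp_all
            · exact h x hx)
        · exact Or.inr ⟨a :: pre, d, post, by simp [heq], by
            intro x hx
            rcases List.mem_cons.mp hx with rfl | hx
            · simp_all
            · exact hpre x hx, hd⟩

-- ===== VERDICT (by name: the statement is the Claim_ definition above) =====
theorem parse_amount_and_target_spec : Claim_equal_parse_amount_and_target := by
  intro args _
  show parse_amount_and_target args = parse_amount_and_target_alt args
  rcases pv_split args with h | ⟨pre, d, post, rfl, hpre, hd⟩
  · -- no digit token anywhere
    unfold parse_amount_and_target parse_amount_and_target_alt
    rw [pv_foldl_nodigit args none h, pvFindDigit_nodigit args 0 h]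
    cases args with
    | nil => simp
    | cons a rest =>
        simp only [Option.map_none, ne_eq, reduceCtorEq, not_false_iff, ite_true,
          List.length_cons, Nat.succ_ne_zero]
        rw [PySem.List.pyGet?_neg_ofNat (a :: rest) 1 (by omega) (by simp)]
        simp [List.getLast?_eq_getElem?]
  · -- args = pre ++ d :: post, pre digit-free, d the first digit token
    unfold parse_amount_and_target parse_amount_and_target_alt
    rw [List.foldl_append, pv_foldl_nodigit pre none hpre]
    simp only [List.foldl_cons, hd, Option.isNone_none, Bool.and_true, ite_true]
    rw [pv_foldl_some post ((PySem.Int.ofStr? d).getD 0) (pre.getLast?.or none),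
      pvFindDigit_split pre d post 0 hpre hd]
    simp only [Option.or_none, Option.map_some, Nat.zero_add, Prod.mk.injEq, true_and]
    cases post with
    | nil =>
        -- the digit token is the last token
        have hn : (pre ++ [d]).length = pre.length + 1 := by simp
        simp only [ne_eq, hn, Nat.add_sub_cancel, not_true_eq_false,
          ite_false]
        cases pre with
        | nil => simp
        | cons p ps =>
            rw [if_pos (show (2:Nat) ≤ (p :: ps).length + 1 by simp only [List.length_cons]; omega),
              PySem.List.pyGet?_neg_ofNat (p :: ps ++ [d]) 2 (by omega) (by simp),
              show (p :: ps ++ [d]).length - 2 = (p :: ps).length - 1 by simp,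
              List.getElem?_append_left (by simp)]
            simp [List.getLast?_eq_getElem?]
    | cons q qs =>
        -- some token follows the digit token; target is the overall last token
        have hlen : (pre ++ d :: q :: qs).length = pre.length + qs.length + 2 := by
          simp; omega
        have hne : ¬ (pre.length : Nat) = (pre ++ d :: q :: qs).length - 1 := by
          rw [hlen]; omega
        rw [if_pos (by simp only [ne_eq, Option.some.injEq]; exact hne), if_pos (by rw [hlen]; omega),
          PySem.List.pyGet?_neg_ofNat _ 1 (by omega) (by rw [hlen]; omega)]
        rw [← List.getLast?_eq_getElem?]
        simp [List.getLast?_append, List.getLast?_cons_cons]
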